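-- pv_equiv track=rewrite | github.com/981377660LMT/algorithm-study | 11_动态规划/dp优化/前缀和优化/1977. 划分数字的方案数-index+remain的前缀和优化dp.py | numberOfCombinations
-- ===== SOURCE A (Python) =====
-- MOD = int(1e9 + 7)
--
-- def numberOfCombinations(s: str) -> int:
--     n = len(s)
--     # !dp[index][len] 表示 前index个数中,最后一个数长度为len的方案数量
--     dp = [[0] * (i + 1) for i in range(n + 1)]
--     dp[0][0] = 1
--     dpSum = [[0] * (i + 1) for i in range(n + 1)]
--     dpSum[0][0] = 1
--
--     for i in range(1, n + 1):
--         for j in range(1, i + 1):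
--             if s[i - j] != "0":  # !这一组的开头
--                 # 这组的长度小于上一组
--                 # dp[i][j] = sum(dp[i - j][k] for k in range(min(j, i - j + 1)))
--                 dp[i][j] = dpSum[i - j][min(j - 1, i - j)]
--                 # 这组的长度等于上一组
--                 if i - 2 * j >= 0 and s[i - j : i] >= s[i - 2 * j : i - j]:
--                     dp[i][j] += dp[i - j][j]
--                 dp[i][j] %= MOD
--             dpSum[i][j] = (dpSum[i][j - 1] + dp[i][j]) % MOD
--
--     return dpSum[-1][-1]
-- ===== SOURCE B (Python) =====
-- MOD = int(1e9 + 7)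
--
-- def numberOfCombinations(s: str) -> int:
--     n = len(s)
--     # lcp[i][j] = length of the longest common prefix of s[i:] and s[j:]
--     lcp = [[0] * (n + 1) for _ in range(n + 1)]
--     for i in reversed(range(n)):
--         lcp[i] = [lcp[i + 1][j + 1] + 1 if s[i] == s[j] else 0 for j in range(n)] + [0]
--
--     def ge(a: int, b: int, length: int) -> bool:
--         # s[a:a+length] >= s[b:b+length]  (both slices fully in range), via the LCP table
--         l = lcp[a][b]
--         return l >= length or s[a + l] >= s[b + l]
--
--     dp = [[0] * (i + 1) for i in range(n + 1)]
--     dp[0][0] = 1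
--     dpSum = [[0] * (i + 1) for i in range(n + 1)]
--     dpSum[0][0] = 1
--
--     for i in range(1, n + 1):
--         for j in range(1, i + 1):
--             if s[i - j] != "0":
--                 dp[i][j] = dpSum[i - j][min(j - 1, i - j)]
--                 if i - 2 * j >= 0 and ge(i - j, i - 2 * j, j):
--                     dp[i][j] += dp[i - j][j]
--                 dp[i][j] %= MOD
--             dpSum[i][j] = (dpSum[i][j - 1] + dp[i][j]) % MOD
--
--     return dpSum[-1][-1]
-- ===== Notes on version B (the rewrite author's own statement) =====
-- stated objective: alternative
-- what changed: B precomputes an (n+1)x(n+1) longest-common-prefix table (reverse DP) so each substring comparison in the main DP is answered in O(1) from the table plus one character compare, instead of A's O(n) slice comparison.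
import Mathlib
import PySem

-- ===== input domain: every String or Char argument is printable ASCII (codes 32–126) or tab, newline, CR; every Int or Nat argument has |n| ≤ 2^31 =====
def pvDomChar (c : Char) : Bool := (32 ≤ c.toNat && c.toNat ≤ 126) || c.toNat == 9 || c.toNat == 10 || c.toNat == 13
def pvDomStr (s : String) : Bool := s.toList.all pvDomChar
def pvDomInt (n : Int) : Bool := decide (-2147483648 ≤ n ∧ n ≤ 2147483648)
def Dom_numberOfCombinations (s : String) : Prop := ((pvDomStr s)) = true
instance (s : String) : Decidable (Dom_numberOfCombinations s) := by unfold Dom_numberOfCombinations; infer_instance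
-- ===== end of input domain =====

-- B replaces A's O(n) Python slice comparisons inside the DP by O(1) lookups in a
-- precomputed longest-common-prefix table (an alternative algorithm; return value identical).

-- ===== PORT A =====
-- shared table helpers: Python list-of-lists reads/writes; every access in both
-- programs has a nonnegative in-range index, so .toNat / getD are exact here.
def pvGet2 (t : List (List Int)) (i j : Int) : Int :=
  (t.getD i.toNat []).getD j.toNat 0

def pvSet2 (t : List (List Int)) (i j : Int) (v : Int) : List (List Int) :=
  t.set i.toNat ((t.getD i.toNat []).set j.toNat v)

-- dp = [[0]*(i+1) for i in range(n+1)]; dp[0][0] = 1   (same shape for dpSum)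
def pvInitDp (n : Nat) : List (List Int) :=
  pvSet2 ((List.range (n + 1)).map (fun i => List.replicate (i + 1) (0 : Int))) 0 0 1

-- Python str >= on two strings, lexicographic on code points (exact)
def pvStrGe : List Char → List Char → Bool
  | [], [] => true
  | [], _ :: _ => false
  | _ :: _, [] => true
  | a :: u, b :: v => if a = b then pvStrGe u v else decide (b < a)

-- body of A's inner loop (one iteration for a given i, j)
def pvStepA (cs : List Char) (i : Int) (st : List (List Int) × List (List Int)) (j : Int) :
    List (List Int) × List (List Int) :=
  let dp := st.1
  let dpSum := st.2
  let dp' :=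
    if PySem.List.pyGetD cs (i - j) ' ' ≠ '0' then
      let v := pvGet2 dpSum (i - j) (min (j - 1) (i - j))
      let v := if decide (0 ≤ i - 2 * j) &&
                  pvStrGe (PySem.List.slice cs (some (i - j)) (some i))
                          (PySem.List.slice cs (some (i - 2 * j)) (some (i - j)))
               then v + pvGet2 dp (i - j) j else v
      pvSet2 dp i j (PySem.Int.mod v 1000000007)
    else dp
  (dp', pvSet2 dpSum i j (PySem.Int.mod (pvGet2 dpSum i (j - 1) + pvGet2 dp' i j) 1000000007))

def numberOfCombinations (s : String) : Int :=
  let cs := s.toList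
  let n : Int := cs.length
  let st := (PySem.List.pyRange 1 (n + 1) 1).foldl
    (fun st i => (PySem.List.pyRange 1 (i + 1) 1).foldl (pvStepA cs i) st)
    (pvInitDp cs.length, pvInitDp cs.length)
  PySem.List.pyGetD (PySem.List.pyGetD st.2 (-1) []) (-1) 0   -- dpSum[-1][-1]

-- ===== PORT B =====
-- lcp[a][b] lookup (indices always nonnegative and in range in B)
def pvLget (t : List (List Int)) (a b : Nat) : Int := (t.getD a []).getD b 0

-- one outer iteration of B's reversed loop: lcp[i] = [lcp[i+1][j+1]+1 if s[i]==s[j] else 0 for j in range(n)] + [0]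
def pvLcpStep (cs : List Char) (t : List (List Int)) (i : Nat) : List (List Int) :=
  t.set i (((List.range cs.length).map (fun j =>
    if cs.getD i ' ' = cs.getD j ' ' then pvLget t (i + 1) (j + 1) + 1 else 0)) ++ [0])

def pvBuildLcp (cs : List Char) : List (List Int) :=
  ((List.range cs.length).reverse).foldl (pvLcpStep cs)
    (List.replicate (cs.length + 1) (List.replicate (cs.length + 1) (0 : Int)))

-- ge(a, b, length): s[a:a+length] >= s[b:b+length] via the lcp table
def pvLcpGe (cs : List Char) (t : List (List Int)) (a b len : Int) : Bool :=
  let l := pvLget t a.toNat b.toNat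
  decide (len ≤ l) || decide (cs.getD (b + l).toNat ' ' ≤ cs.getD (a + l).toNat ' ')

-- body of B's inner loop: identical to A's except the comparison uses the lcp table
def pvStepB (cs : List Char) (lcp : List (List Int)) (i : Int)
    (st : List (List Int) × List (List Int)) (j : Int) :
    List (List Int) × List (List Int) :=
  let dp := st.1
  let dpSum := st.2
  let dp' :=
    if PySem.List.pyGetD cs (i - j) ' ' ≠ '0' then
      let v := pvGet2 dpSum (i - j) (min (j - 1) (i - j))
      let v := if decide (0 ≤ i - 2 * j) && pvLcpGe cs lcp (i - j) (i - 2 * j) j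
               then v + pvGet2 dp (i - j) j else v
      pvSet2 dp i j (PySem.Int.mod v 1000000007)
    else dp
  (dp', pvSet2 dpSum i j (PySem.Int.mod (pvGet2 dpSum i (j - 1) + pvGet2 dp' i j) 1000000007))

def numberOfCombinations_alt (s : String) : Int :=
  let cs := s.toList
  let n : Int := cs.length
  let lcp := pvBuildLcp cs
  let st := (PySem.List.pyRange 1 (n + 1) 1).foldl
    (fun st i => (PySem.List.pyRange 1 (i + 1) 1).foldl (pvStepB cs lcp i) st)
    (pvInitDp cs.length, pvInitDp cs.length)
  PySem.List.pyGetD (PySem.List.pyGetD st.2 (-1) []) (-1) 0   -- dpSum[-1][-1]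

-- ===== PRECONDITION & SPEC =====
def Spec_numberOfCombinations (s : String) (out : Int) : Prop := out = numberOfCombinations_alt s
instance (s : String) (out : Int) : Decidable (Spec_numberOfCombinations s out) := by unfold Spec_numberOfCombinations; infer_instance

-- ===== CLAIM (what is proved, stated in full; the proofs are below) =====
def Claim_equal_numberOfCombinations : Prop := ∀ (s : String), Dom_numberOfCombinations s → Spec_numberOfCombinations s (numberOfCombinations s)

-- ===== LEMMAS AND PROOFS =====

-- longest common prefix length of two lists (specification of the lcp table)
def pvCpl : List Char → List Char → Nat
  | a :: u, b :: v => if a = b then pvCpl u v + 1 else 0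
  | _, _ => 0

theorem pvCpl_nil_right (x : List Char) : pvCpl x [] = 0 := by cases x <;> rfl

theorem pvCpl_take (m : Nat) (x y : List Char) :
    pvCpl (x.take m) (y.take m) = min (pvCpl x y) m := by
  induction x generalizing y m with
  | nil => simp [pvCpl]
  | cons a u ih =>
    cases y with
    | nil => cases m <;> simp [pvCpl]
    | cons b v =>
      cases m with
      | zero => simp [pvCpl]
      | succ m =>
        simp only [List.take_succ_cons, pvCpl]
        by_cases h : a = b
        · rw [if_pos h, if_pos h, ih]
          omega
        · simp [h]

theorem pvStrGe_char (u v : List Char) (h : u.length = v.length) :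
    pvStrGe u v = (decide (u.length ≤ pvCpl u v) ||
      decide (v.getD (pvCpl u v) ' ' ≤ u.getD (pvCpl u v) ' ')) := by
  induction u generalizing v with
  | nil =>
    cases v with
    | nil => simp [pvStrGe, pvCpl]
    | cons b v => simp at h
  | cons a u ih =>
    cases v with
    | nil => simp at h
    | cons b v =>
      simp only [List.length_cons] at h
      by_cases hab : a = b
      · subst hab
        simp only [pvStrGe, pvCpl]
        rw [ih v (by omega)]
        simp
      · simp only [pvStrGe, pvCpl, if_neg hab]
        have : (b < a) ↔ (b ≤ a) := by
          constructor
          · exact le_of_lt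
          · intro hle; exact lt_of_le_of_ne hle (fun he => hab he.symm)
        simp [this]

theorem pvLget_set_self (t : List (List Int)) (i b : Nat) (row : List Int)
    (h : i < t.length) : pvLget (t.set i row) i b = row.getD b 0 := by
  unfold pvLget
  rw [List.getD_eq_getElem?_getD (a := ([] : List Int)), List.getElem?_set_self h,
      Option.getD_some]

theorem pvLget_set_ne (t : List (List Int)) (i a b : Nat) (row : List Int)
    (h : i ≠ a) : pvLget (t.set i row) a b = pvLget t a b := by
  unfold pvLget
  rw [List.getD_eq_getElem?_getD (a := ([] : List Int)), List.getElem?_set_ne h,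
      ← List.getD_eq_getElem?_getD]

theorem pvBuildLcp_aux (cs : List Char) (k : Nat) (hk : k ≤ cs.length) :
    ∀ t : List (List Int), t.length = cs.length + 1 →
      (∀ a b, k ≤ a → pvLget t a b = (pvCpl (cs.drop a) (cs.drop b) : Int)) →
      ∀ a b, pvLget (((List.range k).reverse).foldl (pvLcpStep cs) t) a b =
        (pvCpl (cs.drop a) (cs.drop b) : Int) := by
  induction k with
  | zero => intro t _ hinv a b; simpa using hinv a b (Nat.zero_le a)
  | succ k ih =>
    intro t hlen hinv a b
    have hrange : (List.range (k + 1)).reverse = k :: (List.range k).reverse := by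
      simp [List.range_succ]
    rw [hrange, List.foldl_cons]
    refine ih (by omega) (pvLcpStep cs t k) ?_ ?_ a b
    · simp [pvLcpStep, hlen]
    · intro a b hka
      rcases Nat.eq_or_lt_of_le hka with he | hlt
      · -- a = k : the freshly written row
        subst he
        unfold pvLcpStep
        rw [pvLget_set_self _ _ _ _ (by omega)]
        by_cases hb : b < cs.length
        · rw [List.getD_eq_getElem?_getD, List.getElem?_append_left (by simpa using hb)]
          rw [List.getElem?_map, List.getElem?_range hb]
          simp only [Option.map_some, Option.getD_some]
          have ha' : k < cs.length := by omega
          rw [hinv (k + 1) (b + 1) (by omega)]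
          rw [List.drop_eq_getElem_cons ha', List.drop_eq_getElem_cons hb]
          rw [List.getD_eq_getElem?_getD, List.getElem?_eq_getElem ha', Option.getD_some,
              List.getD_eq_getElem?_getD (l := cs) (a := ' '), List.getElem?_eq_getElem hb,
              Option.getD_some]
          simp only [pvCpl]
          split
          · push_cast; ring
          · rfl
        · -- b ≥ n : row entry is 0, and cs.drop b = []
          have hdb : cs.drop b = [] := List.drop_eq_nil_of_le (by omega)
          rw [hdb, pvCpl_nil_right]
          rw [List.getD_eq_getElem?_getD, List.getElem?_append_right (by simp; omega)]
          simp only [List.length_map, List.length_range]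
          cases h2 : b - cs.length with
          | zero => simp
          | succ m => simp
      · -- a > k : untouched row
        unfold pvLcpStep
        rw [pvLget_set_ne _ _ _ _ _ (by omega)]
        exact hinv a b (by omega)

theorem pvBuildLcp_correct (cs : List Char) (a b : Nat) :
    pvLget (pvBuildLcp cs) a b = (pvCpl (cs.drop a) (cs.drop b) : Int) := by
  unfold pvBuildLcp
  refine pvBuildLcp_aux cs cs.length le_rfl _ (by simp) ?_ a b
  intro a b hna
  have hda : cs.drop a = [] := List.drop_eq_nil_of_le hna
  rw [hda]
  unfold pvLget
  have hz : pvCpl [] (cs.drop b) = 0 := rfl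
  rw [hz]
  rcases Nat.lt_or_ge a (cs.length + 1) with hlt | hge
  · rw [List.getD_eq_getElem?_getD (a := ([] : List Int)), List.getElem?_replicate,
        if_pos hlt]
    simp
  · rw [List.getD_eq_getElem?_getD (a := ([] : List Int)), List.getElem?_replicate,
        if_neg (by omega)]
    simp

-- the key fact: A's slice comparison equals B's lcp-table test
theorem pvCond_eq (cs : List Char) (i j : Int) (h1 : 1 ≤ j)
    (h3 : i ≤ (cs.length : Int)) (h4 : 0 ≤ i - 2 * j) :
    pvStrGe (PySem.List.slice cs (some (i - j)) (some i))
            (PySem.List.slice cs (some (i - 2 * j)) (some (i - j)))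
      = pvLcpGe cs (pvBuildLcp cs) (i - j) (i - 2 * j) j := by
  set n := cs.length with hn
  set b := (i - 2 * j).toNat with hbdef
  set jn := j.toNat with hjdef
  have e1 : i - j = ((b + jn : Nat) : Int) := by push_cast; omega
  have e2 : i = ((b + 2 * jn : Nat) : Int) := by push_cast; omega
  have e3 : i - 2 * j = ((b : Nat) : Int) := by omega
  have e4 : j = ((jn : Nat) : Int) := by omega
  have hbound : b + 2 * jn ≤ n := by omega
  rw [e3, e1, e2, e4]
  rw [PySem.List.slice_natCast, PySem.List.slice_natCast]
  have d1 : b + 2 * jn - (b + jn) = jn := by omega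
  have d2 : b + jn - b = jn := by omega
  rw [d1, d2]
  -- the lcp value
  set L := pvCpl (cs.drop (b + jn)) (cs.drop b) with hL
  have hlcp : pvLget (pvBuildLcp cs) (b + jn) b = (L : Int) :=
    pvBuildLcp_correct cs (b + jn) b
  simp only [pvLcpGe, Int.toNat_natCast]
  simp only [hlcp]
  have hlen1 : ((cs.drop (b + jn)).take jn).length = jn := by
    simp [List.length_take, List.length_drop]; omega
  have hlen2 : ((cs.drop b).take jn).length = jn := by
    simp [List.length_take, List.length_drop]; omega
  rw [pvStrGe_char _ _ (by rw [hlen1, hlen2]), hlen1]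
  rw [pvCpl_take, ← hL]
  by_cases hLj : jn ≤ L
  · have hmin : min L jn = jn := by omega
    rw [hmin]
    simp [hLj]
  · have hLlt : L < jn := by omega
    have hmin : min L jn = L := by omega
    rw [hmin]
    have hidx1 : (((b + jn : Nat) : Int) + (L : Int)).toNat = b + jn + L := by omega
    have hidx2 : (((b : Nat) : Int) + (L : Int)).toNat = b + L := by omega
    rw [hidx1, hidx2]
    have hget1 : ((cs.drop (b + jn)).take jn).getD L ' ' = cs.getD (b + jn + L) ' ' := by
      rw [List.getD_eq_getElem?_getD, List.getElem?_take_of_lt hLlt, List.getElem?_drop,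
          ← List.getD_eq_getElem?_getD]
    have hget2 : ((cs.drop b).take jn).getD L ' ' = cs.getD (b + L) ' ' := by
      rw [List.getD_eq_getElem?_getD, List.getElem?_take_of_lt hLlt, List.getElem?_drop,
          ← List.getD_eq_getElem?_getD]
    rw [hget1, hget2]
    have hn' : ¬ (jn ≤ L) := by omega
    simp [hn']

theorem pvStep_eq (cs : List Char) (i j : Int) (st : List (List Int) × List (List Int))
    (h1 : 1 ≤ j) (h2 : j ≤ i) (h3 : i ≤ (cs.length : Int)) :
    pvStepA cs i st j = pvStepB cs (pvBuildLcp cs) i st j := by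
  unfold pvStepA pvStepB
  by_cases h4 : 0 ≤ i - 2 * j
  · rw [pvCond_eq cs i j h1 h3 h4]
  · have : decide (0 ≤ i - 2 * j) = false := by simpa using h4
    rw [this]
    simp

-- ===== VERDICT (by name: the statement is the Claim_ definition above) =====
theorem numberOfCombinations_spec : Claim_equal_numberOfCombinations := by
  intro s _
  unfold Spec_numberOfCombinations numberOfCombinations numberOfCombinations_alt
  simp only []
  congr 2
  congr 1
  apply PySem.List.foldl_congr_mem
  intro st i hi
  have hi' := (PySem.List.mem_pyRange_one).1 hi
  apply PySem.List.foldl_congr_mem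
  intro st' j hj
  have hj' := (PySem.List.mem_pyRange_one).1 hj
  exact pvStep_eq s.toList i j st' (by omega) (by omega) (by omega)
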